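-- pv_equiv track=rewrite | github.com/udaycoder/Minance | minance1.py | findNumberOfExtraDays
-- ===== SOURCE A (Python) =====
-- def isLeapYear(year):
--     if((year%400 == 0) or (year%100!=0 and year%4==0)):
--         return  True
--     else:
--         return False
--
-- def findNumberOfExtraDays(year):
--     count = 0;
--     if(year>2000):
--         for i in range(2001,(year+1)):
--             if(isLeapYear(i)):
--                 count+=2
--             else:
--                 count+=1
--     elif(year<2000):
--         for i in range((year+1),2001):
--             if(isLeapYear(i)):
--                 count+=2
--             else:
--                 count+=1
--     return count
-- ===== SOURCE B (Python) =====
-- def _leapsUpTo(n):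
--     # number of leap years y with 1 <= ... well: n//4 - n//100 + n//400 counts leap years in (0, n] (and works for negative n by floor division)
--     return n // 4 - n // 100 + n // 400
--
-- def findNumberOfExtraDays(year):
--     lo, hi = (2000, year) if year > 2000 else (year, 2000)
--     return (hi - lo) + (_leapsUpTo(hi) - _leapsUpTo(lo))
-- ===== Notes on version B (the rewrite author's own statement) =====
-- stated objective: faster
-- what changed: Replaces the per-year loop with a closed-form count: (hi-lo) years plus the leap-year count on the interval computed as the difference of n//4 - n//100 + n//400 prefix counts.
import Mathlib
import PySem

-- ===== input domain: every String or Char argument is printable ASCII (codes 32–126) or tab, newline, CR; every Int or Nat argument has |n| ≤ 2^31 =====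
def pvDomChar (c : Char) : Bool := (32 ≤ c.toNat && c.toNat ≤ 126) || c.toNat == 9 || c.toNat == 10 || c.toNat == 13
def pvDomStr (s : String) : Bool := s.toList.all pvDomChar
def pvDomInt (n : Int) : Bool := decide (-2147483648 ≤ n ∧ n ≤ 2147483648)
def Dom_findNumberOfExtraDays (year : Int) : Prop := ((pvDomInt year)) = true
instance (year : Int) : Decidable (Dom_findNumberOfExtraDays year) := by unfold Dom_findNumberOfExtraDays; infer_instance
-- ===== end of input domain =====

-- B replaces A's per-year loop with a closed-form count (interval length plus a
-- difference of n//4 - n//100 + n//400 leap-year prefix counts); objective: faster.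

-- ===== PORT A =====
def isLeapYear (year : Int) : Bool :=
  if PySem.Int.mod year 400 == 0 || (PySem.Int.mod year 100 != 0 && PySem.Int.mod year 4 == 0) then
    true
  else
    false

def findNumberOfExtraDays (year : Int) : Int :=
  let count : Int := 0
  if year > 2000 then
    (PySem.List.pyRange 2001 (year + 1) 1).foldl
      (fun count i => if isLeapYear i then count + 2 else count + 1) count
  else if year < 2000 then
    (PySem.List.pyRange (year + 1) 2001 1).foldl
      (fun count i => if isLeapYear i then count + 2 else count + 1) count
  else
    count

-- ===== PORT B =====
def leapsUpTo (n : Int) : Int :=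
  PySem.Int.floordiv n 4 - PySem.Int.floordiv n 100 + PySem.Int.floordiv n 400

def findNumberOfExtraDays_alt (year : Int) : Int :=
  let p : Int × Int := if year > 2000 then (2000, year) else (year, 2000)
  (p.2 - p.1) + (leapsUpTo p.2 - leapsUpTo p.1)

-- ===== PRECONDITION & SPEC =====
def Spec_findNumberOfExtraDays (year : Int) (out : Int) : Prop := out = findNumberOfExtraDays_alt year
instance (year : Int) (out : Int) : Decidable (Spec_findNumberOfExtraDays year out) := by unfold Spec_findNumberOfExtraDays; infer_instance

-- ===== CLAIM (what is proved, stated in full; the proofs are below) =====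
def Claim_equal_findNumberOfExtraDays : Prop := ∀ (year : Int), Dom_findNumberOfExtraDays year → Spec_findNumberOfExtraDays year (findNumberOfExtraDays year)

-- ===== LEMMAS AND PROOFS =====

-- the prefix count steps by exactly the leap indicator
theorem leapsUpTo_step (i : Int) :
    leapsUpTo i - leapsUpTo (i - 1) = (if isLeapYear i then 1 else 0) := by
  have e4 := PySem.Int.floordiv_eq_ediv_of_pos (a := i) (by norm_num : (0:Int) < 4)
  have e100 := PySem.Int.floordiv_eq_ediv_of_pos (a := i) (by norm_num : (0:Int) < 100)
  have e400 := PySem.Int.floordiv_eq_ediv_of_pos (a := i) (by norm_num : (0:Int) < 400)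
  have f4 := PySem.Int.floordiv_eq_ediv_of_pos (a := i - 1) (by norm_num : (0:Int) < 4)
  have f100 := PySem.Int.floordiv_eq_ediv_of_pos (a := i - 1) (by norm_num : (0:Int) < 100)
  have f400 := PySem.Int.floordiv_eq_ediv_of_pos (a := i - 1) (by norm_num : (0:Int) < 400)
  cases hb : isLeapYear i with
  | false =>
    simp only [Bool.false_eq_true, if_false]
    simp only [isLeapYear] at hb
    simp at hb
    simp only [leapsUpTo, e4, e100, e400, f4, f100, f400]
    omega
  | true =>
    simp only [if_true]
    simp only [isLeapYear] at hb
    simp at hb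
    simp only [leapsUpTo, e4, e100, e400, f4, f100, f400]
    omega

-- the loop body in closed form
theorem loop_sum (n : Nat) (a : Int) :
    (PySem.List.pyRange a (a + n) 1).foldl
      (fun count i => if isLeapYear i then count + 2 else count + 1) 0
    = (n : Int) + (leapsUpTo (a + n - 1) - leapsUpTo (a - 1)) := by
  induction n with
  | zero => simp [PySem.List.pyRange_one_eq_nil (le_refl a)]
  | succ n ih =>
    have hb : (a + ((n : Int) + 1)) = (a + n) + 1 := by ring
    have hle : a ≤ a + (n : Int) := by omega
    push_cast
    rw [hb, PySem.List.pyRange_one_succ_right hle, List.foldl_append]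
    simp only [List.foldl_cons, List.foldl_nil, ih]
    have hc : a + (n : Int) + 1 - 1 = a + n := by ring
    rw [hc]
    have := leapsUpTo_step (a + n)
    split_ifs at this ⊢ <;> omega

-- ===== VERDICT (by name: the statement is the Claim_ definition above) =====
theorem findNumberOfExtraDays_spec : Claim_equal_findNumberOfExtraDays := by
  intro year _
  unfold Spec_findNumberOfExtraDays findNumberOfExtraDays findNumberOfExtraDays_alt
  by_cases h1 : year > 2000
  · have hn : year + 1 = 2001 + ((year - 2000).toNat : Int) := by omega
    simp only [h1, if_pos]
    rw [hn, loop_sum (year - 2000).toNat 2001]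
    have : ((year - 2000).toNat : Int) = year - 2000 := by omega
    rw [this]
    ring_nf
  · by_cases h2 : year < 2000
    · have hn : (2001 : Int) = (year + 1) + ((2000 - year).toNat : Int) := by omega
      simp only [h1, h2, if_false]
      rw [hn, loop_sum (2000 - year).toNat (year + 1)]
      have : ((2000 - year).toNat : Int) = 2000 - year := by omega
      have hy : year + 1 + (2000 - year) - 1 = 2000 := by ring
      rw [this, hy]
      simp only [if_true]
      ring_nf
    · have : year = 2000 := by omega
      subst this
      norm_num
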